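-- pv_equiv track=rewrite | github.com/StrunetsD/study | 6_lesson/12.py | search_number
-- ===== SOURCE A (Python) =====
-- def search_number(matrix, H):
--     col_with_H = []
--     col_without_H = []
--     rows = len(matrix)
--     cols = len(matrix[0])
--
--     for col in range(cols):
--         has_num = False
--         for row in range(rows):
--             if matrix[row][col] == H:
--                 has_num = True
--                 break
--
--         if not has_num:
--             col_with_H.append(col)
--         else:
--             col_without_H.append(col)
--     return col_without_H, col_with_H
-- ===== SOURCE B (Python) =====
-- def search_number(matrix, H):
--     cols = len(matrix[0])
--     hit = set()
--     for row in matrix: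
--         for j, v in enumerate(row):
--             if v == H:
--                 hit.add(j)
--     with_H = [col for col in range(cols) if col in hit]
--     without_H = [col for col in range(cols) if col not in hit]
--     return with_H, without_H
-- ===== Notes on version B (the rewrite author's own statement) =====
-- stated objective: alternative
-- what changed: Instead of scanning all rows once per column (nested column-major scans), B makes a single row-major pass building a set of column indices where H occurs, then emits the two index lists by membership in that set.
-- outside the precondition, e.g. on search_number([[5, 5], [5]], 5): A returns ([0, 1], []), B returns ([0, 1], [])
import Mathlib
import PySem

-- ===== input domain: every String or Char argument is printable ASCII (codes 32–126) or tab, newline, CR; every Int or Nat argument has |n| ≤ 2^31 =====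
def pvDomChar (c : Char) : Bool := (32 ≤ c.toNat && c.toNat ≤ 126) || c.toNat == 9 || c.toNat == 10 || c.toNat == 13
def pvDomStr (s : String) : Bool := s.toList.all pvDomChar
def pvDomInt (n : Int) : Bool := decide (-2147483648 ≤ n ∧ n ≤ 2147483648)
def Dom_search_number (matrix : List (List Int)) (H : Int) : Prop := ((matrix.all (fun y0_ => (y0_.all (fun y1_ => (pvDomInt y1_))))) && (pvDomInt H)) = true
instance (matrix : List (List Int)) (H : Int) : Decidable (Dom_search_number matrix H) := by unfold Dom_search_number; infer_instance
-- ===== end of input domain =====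

-- B replaces A's per-column scans over all rows by one row-major pass that
-- collects the set of column indices containing H, then emits both lists by
-- set membership (objective: alternative decomposition, same asymptotic cost).

-- ===== PORT A =====
def search_number (matrix : List (List Int)) (H : Int) : List Int × List Int :=
  let rows := matrix.length
  let cols := (matrix.headD []).length
  let p := (List.range cols).foldl
    (fun (acc : List Int × List Int) col =>
      let has_num := (List.range rows).any (fun row => (matrix.getD row []).getD col 0 == H)
      if !has_num then (acc.1 ++ [(col : Int)], acc.2)
      else (acc.1, acc.2 ++ [(col : Int)]))
    ([], [])
  (p.2, p.1)

-- ===== PORT B =====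
def search_number_alt (matrix : List (List Int)) (H : Int) : List Int × List Int :=
  let cols := (matrix.headD []).length
  let hit : PySem.Set Int := matrix.foldl
    (fun s row =>
      (PySem.List.enumerate row).foldl
        (fun s jv => if jv.2 == H then PySem.Set.add s jv.1 else s) s)
    PySem.Set.empty
  let with_H := ((List.range cols).filter (fun col : Nat => hit.contains ((col : Nat) : Int))).map
    (fun c : Nat => ((c : Nat) : Int))
  let without_H := ((List.range cols).filter (fun col : Nat => !hit.contains ((col : Nat) : Int))).map
    (fun c : Nat => ((c : Nat) : Int))
  (with_H, without_H)

-- ===== PRECONDITION & SPEC =====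
-- Pre_ excludes the empty matrix (A raises IndexError on matrix[0]) and ragged
-- matrices with a row shorter than the first row, on which A may raise
-- IndexError depending on where H appears.
def Pre_search_number (matrix : List (List Int)) (H : Int) : Prop :=
  matrix ≠ [] ∧ ∀ row ∈ matrix, (matrix.headD []).length ≤ row.length
instance (matrix : List (List Int)) (H : Int) : Decidable (Pre_search_number matrix H) := by
  unfold Pre_search_number; infer_instance
def pvWitness_search_number : List (List Int) × Int := ([[1, 2], [3, 4]], 3)

def Spec_search_number (matrix : List (List Int)) (H : Int) (out : List Int × List Int) : Prop := out = search_number_alt matrix H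
instance (matrix : List (List Int)) (H : Int) (out : List Int × List Int) : Decidable (Spec_search_number matrix H out) := by unfold Spec_search_number; infer_instance

-- ===== CLAIM (what is proved, stated in full; the proofs are below) =====
def Claim_equal_search_number : Prop := ∀ (matrix : List (List Int)) (H : Int), Dom_search_number matrix H → Pre_search_number matrix H → Spec_search_number matrix H (search_number matrix H)

-- ===== LEMMAS AND PROOFS =====

-- A's two-sided append loop is a pair of filters.
theorem foldl_pair_append (l : List Nat) (p : Nat → Bool) (a b : List Int) :
    l.foldl
      (fun (acc : List Int × List Int) col =>
        if !(p col) then (acc.1 ++ [(col : Int)], acc.2)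
        else (acc.1, acc.2 ++ [(col : Int)])) (a, b)
    = (a ++ (l.filter (fun c => !(p c))).map (fun c : Nat => ((c : Nat) : Int)),
       b ++ (l.filter p).map (fun c : Nat => ((c : Nat) : Int))) := by
  induction l generalizing a b with
  | nil => simp
  | cons x xs ih =>
    rw [List.foldl_cons]
    cases h : p x with
    | true =>
      rw [if_neg (by simp [h]), ih]
      simp [h]
    | false =>
      rw [if_pos (by simp [h]), ih]
      simp [h, List.append_assoc]

-- membership in the inner accumulation over one row
theorem mem_row_foldl (l : List (Int × Int)) (s : PySem.Set Int) (H x : Int) :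
    (x ∈ l.foldl (fun s jv => if jv.2 == H then PySem.Set.add s jv.1 else s) s)
    ↔ (x ∈ s ∨ ∃ jv ∈ l, jv.2 = H ∧ jv.1 = x) := by
  induction l generalizing s with
  | nil => simp
  | cons jv rest ih =>
    rw [List.foldl_cons]
    by_cases h : jv.2 = H
    · rw [if_pos (by simp [h]), ih]
      simp only [PySem.Set.mem_add, List.mem_cons]
      constructor
      · rintro (((hs | rfl) ) | ⟨w, hw, h2, h1⟩)
        · exact Or.inl hs
        · exact Or.inr ⟨jv, Or.inl rfl, h, rfl⟩
        · exact Or.inr ⟨w, Or.inr hw, h2, h1⟩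
      · rintro (hs | ⟨w, (rfl | hw), h2, h1⟩)
        · exact Or.inl (Or.inl hs)
        · exact Or.inl (Or.inr h1.symm)
        · exact Or.inr ⟨w, hw, h2, h1⟩
    · rw [if_neg (by simp [h]), ih]
      constructor
      · rintro (hs | ⟨w, hw, h2, h1⟩)
        · exact Or.inl hs
        · exact Or.inr ⟨w, List.mem_cons_of_mem _ hw, h2, h1⟩
      · rintro (hs | ⟨w, hw, h2, h1⟩)
        · exact Or.inl hs
        · rcases List.mem_cons.1 hw with rfl | hw
          · exact absurd h2 h
          · exact Or.inr ⟨w, hw, h2, h1⟩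

-- membership in B's hit set
theorem mem_hit (matrix : List (List Int)) (s : PySem.Set Int) (H x : Int) :
    (x ∈ matrix.foldl
        (fun s row =>
          (PySem.List.enumerate row).foldl
            (fun s jv => if jv.2 == H then PySem.Set.add s jv.1 else s) s) s)
    ↔ (x ∈ s ∨ ∃ row ∈ matrix, ∃ k : Nat, ∃ h : k < row.length,
          row[k] = H ∧ (k : Int) = x) := by
  induction matrix generalizing s with
  | nil => simp
  | cons row rest ih =>
    rw [List.foldl_cons, ih, mem_row_foldl]
    constructor
    · rintro ((hs | ⟨jv, hjv, h2, h1⟩) | ⟨r, hr, k, hk, hH, hkx⟩)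
      · exact Or.inl hs
      · obtain ⟨k, hk, rfl⟩ := (PySem.List.mem_enumerate_iff _ _ _).1 hjv
        exact Or.inr ⟨row, List.mem_cons_self .., k, hk, by simpa using h2, by simpa using h1⟩
      · exact Or.inr ⟨r, List.mem_cons_of_mem _ hr, k, hk, hH, hkx⟩
    · rintro (hs | ⟨r, hr, k, hk, hH, hkx⟩)
      · exact Or.inl (Or.inl hs)
      · rcases List.mem_cons.1 hr with rfl | hr
        · refine Or.inl (Or.inr ⟨((k : Int), r[k]), ?_, by simpa using hH, by simpa using hkx⟩)
          exact (PySem.List.mem_enumerate_iff _ _ _).2 ⟨k, hk, by simp⟩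
        · exact Or.inr ⟨r, hr, k, hk, hH, hkx⟩

-- the two per-column tests agree on in-range columns under Pre_
theorem tests_agree (matrix : List (List Int)) (H : Int)
    (hpre : ∀ row ∈ matrix, (matrix.headD []).length ≤ row.length)
    (col : Nat) (hcol : col < (matrix.headD []).length) :
    ((List.range matrix.length).any
        (fun row => (matrix.getD row []).getD col 0 == H))
    = (matrix.foldl
        (fun s row =>
          (PySem.List.enumerate row).foldl
            (fun s jv => if jv.2 == H then PySem.Set.add s jv.1 else s) s)
        PySem.Set.empty).contains ((col : Nat) : Int) := by
  rw [Bool.eq_iff_iff, List.any_eq_true, PySem.Set.contains_iff, mem_hit]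
  constructor
  · rintro ⟨i, hi, hEq⟩
    rw [List.mem_range] at hi
    have hlen : col < (matrix[i]).length :=
      lt_of_lt_of_le hcol (hpre _ (List.getElem_mem hi))
    refine Or.inr ⟨matrix[i], List.getElem_mem hi, col, hlen, ?_, rfl⟩
    have : (matrix.getD i []).getD col 0 = H := by simpa using hEq
    rwa [List.getD_eq_getElem _ _ hi, List.getD_eq_getElem _ _ hlen] at this
  · rintro (h | ⟨row, hrow, k, hk, hH, hkc⟩)
    · simp [PySem.Set.empty] at h
    · obtain ⟨i, hi, rfl⟩ := List.mem_iff_getElem.1 hrow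
      have hkcol : k = col := by exact_mod_cast hkc
      subst hkcol
      refine ⟨i, List.mem_range.2 hi, ?_⟩
      simp [List.getD, List.getElem?_eq_getElem hi, List.getElem?_eq_getElem hk, hH]

-- ===== VERDICT (by name: the statement is the Claim_ definition above) =====
theorem search_number_spec : Claim_equal_search_number := by
  intro matrix H _ hpre
  obtain ⟨-, hpre⟩ := hpre
  unfold Spec_search_number search_number search_number_alt
  dsimp only
  rw [foldl_pair_append]
  simp only [List.nil_append, Prod.mk.injEq]
  refine ⟨congrArg _ (List.filter_congr (fun col hcol =>
      tests_agree matrix H hpre col (List.mem_range.1 hcol))), ?_⟩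
  exact congrArg _ (List.filter_congr (fun col hcol => by
      rw [tests_agree matrix H hpre col (List.mem_range.1 hcol)]))
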